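-- pv_equiv track=rewrite | github.com/nathan-castlehow/Advent-of-Code | 2021/Day3/main.py | get_scrubber_rating
-- ===== SOURCE A (Python) =====
-- def get_scrubber_rating(question_input):
--     bit_off = []
--     bit_on = []
--
--     current_list = question_input
--
--     for current_bit_pos in range(0, len(question_input[0])):
--         if len(current_list) <= 1:
--             break
--
--         for i in range(0, len(current_list)):
--             line = current_list[i]
--             current_bit = line[current_bit_pos]
--
--             match current_bit:
--                 case "0":
--                     bit_off.append(line)
--                 case "1":
--                     bit_on.append(line)
--
--         current_list = bit_off if len(bit_on) >= len(bit_off) else bit_on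
--         bit_off = []
--         bit_on = []
--
--     return int(current_list.pop(), 2)
-- ===== SOURCE B (Python) =====
-- def get_scrubber_rating(question_input):
--     width = len(question_input[0])
--
--     def helper(lst, pos):
--         if len(lst) <= 1 or pos >= width:
--             return int(lst.pop(), 2)
--         zeros = [s for s in lst if s[pos] == "0"]
--         ones = [s for s in lst if s[pos] == "1"]
--         return helper(zeros if len(ones) >= len(zeros) else ones, pos + 1)
--
--     return helper(question_input, 0)
-- ===== Notes on version B (the rewrite author's own statement) =====
-- stated objective: simpler
-- what changed: A's imperative loop over bit positions with two mutable append-accumulator lists rebuilt and an indexed inner scan is replaced by a recursion on the bit index whose body partitions the candidates with two comprehensions and recurses on the tie-broken minority side.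
import Mathlib
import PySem

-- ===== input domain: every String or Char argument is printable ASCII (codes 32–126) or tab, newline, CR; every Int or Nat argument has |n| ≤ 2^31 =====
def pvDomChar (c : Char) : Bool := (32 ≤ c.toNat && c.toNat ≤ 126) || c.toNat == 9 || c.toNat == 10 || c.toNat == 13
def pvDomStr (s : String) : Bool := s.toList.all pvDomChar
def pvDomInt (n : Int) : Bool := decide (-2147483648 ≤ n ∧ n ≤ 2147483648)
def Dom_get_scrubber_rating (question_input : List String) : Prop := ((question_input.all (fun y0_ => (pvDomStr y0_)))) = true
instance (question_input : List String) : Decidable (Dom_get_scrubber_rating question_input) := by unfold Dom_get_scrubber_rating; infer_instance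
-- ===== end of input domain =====

-- B replaces A's imperative accumulator loop by a recursion on the bit index that partitions
-- the candidates with two filters (objective: simpler). Both Pythons pop from the input list
-- when it is never filtered (len <= 1 or width 0); the equivalence proved here is about the
-- RETURN value only.


-- int(s, 2), hand-ported (no PySem primitive for base 2): CPython's base-2 literal grammar
-- (surrounding whitespace, optional sign, optional 0b/0B prefix, single underscores between
-- digits); none = ValueError. Exact on the ASCII domain; shared by both ports.
def pvIsPyWs (c : Char) : Bool :=
  c == ' ' || c == '\t' || c == '\n' || c == '\r' || c == Char.ofNat 11 || c == Char.ofNat 12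

def pvBin : List Char → Int → Option Int
  | [], acc => some acc
  | '_' :: rest, acc =>
    match rest with
    | c :: rest' =>
      if c == '0' then pvBin rest' (2 * acc)
      else if c == '1' then pvBin rest' (2 * acc + 1) else none
    | [] => none
  | c :: rest, acc =>
    if c == '0' then pvBin rest (2 * acc)
    else if c == '1' then pvBin rest (2 * acc + 1) else none

def pvInt2? (cs : List Char) : Option Int :=
  let cs1 := ((cs.dropWhile pvIsPyWs).reverse.dropWhile pvIsPyWs).reverse
  let sc : Int × List Char :=
    match cs1 with
    | '-' :: rest => (-1, rest)
    | '+' :: rest => (1, rest)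
    | _ => (1, cs1)
  let body : List Char :=
    match sc.2 with
    | '0' :: 'b' :: rest => match rest with | '_' :: r => r | _ => rest
    | '0' :: 'B' :: rest => match rest with | '_' :: r => r | _ => rest
    | _ => sc.2
  match body with
  | [] => none
  | '_' :: _ => none
  | _ => (pvBin body 0).map (fun v => sc.1 * v)

-- ===== PORT A =====
-- inner loop: for i in range(0, len(current_list)): append line to bit_off / bit_on by its bit
def pvAInner (current_list : List String) (current_bit_pos : Int) : List String × List String :=
  (PySem.List.pyRange 0 (PySem.List.len current_list) 1).foldl
    (fun (acc : List String × List String) i =>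
      let line := PySem.List.pyGetD current_list i ""
      let current_bit := PySem.Str.pyGet? line current_bit_pos
      if current_bit == some '0' then (acc.1 ++ [line], acc.2)
      else if current_bit == some '1' then (acc.1, acc.2 ++ [line])
      else acc)
    ([], [])

-- outer loop: for current_bit_pos in range(0, len(question_input[0])), with the early break
def pvAOuter (positions : List Int) (current_list : List String) : List String :=
  match positions with
  | [] => current_list
  | pos :: rest =>
    if current_list.length ≤ 1 then current_list
    else
      let p := pvAInner current_list pos
      pvAOuter rest (if p.2.length ≥ p.1.length then p.1 else p.2)

def get_scrubber_rating (question_input : List String) : Int :=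
  -- question_input[0]: Python raises IndexError on []; Pre_ excludes the empty list
  let width := PySem.Str.len (question_input.headD "")
  let final := pvAOuter (PySem.List.pyRange 0 width 1) question_input
  -- current_list.pop(): Python raises IndexError on []; Pre_ excludes that path
  match final.getLast? with
  | some s => (pvInt2? s.toList).getD 0
  | none => 0

-- ===== PORT B =====
-- int(lst.pop(), 2) — last element (list emptiness excluded by Pre_)
def pvBPop2 (lst : List String) : Int :=
  match lst.getLast? with
  | some s => (pvInt2? s.toList).getD 0
  | none => 0

def pvBHelper (width : Nat) (lst : List String) (pos : Nat) : Int :=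
  if lst.length ≤ 1 ∨ width ≤ pos then pvBPop2 lst
  else
    let zeros := lst.filter (fun s => PySem.Str.pyGet? s (pos : Int) == some '0')
    let ones := lst.filter (fun s => PySem.Str.pyGet? s (pos : Int) == some '1')
    pvBHelper width (if ones.length ≥ zeros.length then zeros else ones) (pos + 1)
termination_by width - pos
decreasing_by omega

def get_scrubber_rating_alt (question_input : List String) : Int :=
  -- width = len(question_input[0]) (a Nat: Python string lengths are nonnegative)
  let width := (question_input.headD "").toList.length
  pvBHelper width question_input 0

-- ===== PRECONDITION & SPEC =====
-- the candidates still present when position i is reached, had the kept bits been l's bits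
def pvClassAt (q : List String) (l : String) (i : Nat) : List String :=
  q.filter (fun s => i ≤ s.toList.length && s.toList.take i == l.toList.take i)

-- the bit A keeps among S at position i (tie keeps '0')
def pvMinBit (S : List String) (i : Nat) : Char :=
  if (S.countP (fun s => s.toList[i]? == some '1')) ≥ (S.countP (fun s => s.toList[i]? == some '0')) then '0' else '1'

-- l survives the filtering: wherever ≥ 2 candidates still match it, none is too short
-- (that would be A's IndexError) and l carries the kept bit
def pvCandOk (q : List String) (l : String) (w : Nat) : Bool :=
  (List.range w).all (fun i =>
    (pvClassAt q l i).length ≤ 1 ||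
      ((pvClassAt q l i).all (fun s => i < s.toList.length) &&
       (l.toList[i]? == some (pvMinBit (pvClassAt q l i) i))))

-- the list A pops from: the candidates at the first position with ≤ 1 of them (else at w)
def pvFinal (q : List String) (l : String) (w : Nat) : List String :=
  pvClassAt q l (((List.range w).find? (fun i => (pvClassAt q l i).length ≤ 1)).getD w)

def pvRetOk (q : List String) (l : String) (w : Nat) : Bool :=
  pvCandOk q l w &&
    (match (pvFinal q l w).getLast? with
     | some s => (pvInt2? s.toList).isSome
     | none => false)

-- Pre_ = exactly the inputs on which A returns: a nonempty list with some line l that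
-- survives the bit filtering (no step strands it outside the tie-broken majority and no
-- still-matching line is shorter than the position — A's IndexError), such that the last
-- remaining candidate is a valid base-2 literal (else A's ValueError / empty-pop IndexError).
def Pre_get_scrubber_rating (question_input : List String) : Prop :=
  question_input ≠ [] ∧
  ∃ l ∈ question_input,
    pvRetOk question_input l (question_input.headD "").toList.length = true

instance (question_input : List String) : Decidable (Pre_get_scrubber_rating question_input) := by
  unfold Pre_get_scrubber_rating; infer_instance

def pvWitness_get_scrubber_rating : List String := (["10", "01"])

def Spec_get_scrubber_rating (question_input : List String) (out : Int) : Prop := out = get_scrubber_rating_alt question_input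
instance (question_input : List String) (out : Int) : Decidable (Spec_get_scrubber_rating question_input out) := by unfold Spec_get_scrubber_rating; infer_instance

-- ===== CLAIM (what is proved, stated in full; the proofs are below) =====
def Claim_equal_get_scrubber_rating : Prop := ∀ (question_input : List String), Dom_get_scrubber_rating question_input → Pre_get_scrubber_rating question_input → Spec_get_scrubber_rating question_input (get_scrubber_rating question_input)

-- ===== LEMMAS AND PROOFS =====

-- the two-accumulator append loop is the pair of filters
theorem pvFoldPair (p : Int) (l : List String) (a b : List String) :
    l.foldl
      (fun (acc : List String × List String) line =>
        if PySem.Str.pyGet? line p == some '0' then (acc.1 ++ [line], acc.2)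
        else if PySem.Str.pyGet? line p == some '1' then (acc.1, acc.2 ++ [line])
        else acc)
      (a, b)
    = (a ++ l.filter (fun s => PySem.Str.pyGet? s p == some '0'),
       b ++ l.filter (fun s => PySem.Str.pyGet? s p == some '1')) := by
  induction l generalizing a b with
  | nil => simp
  | cons s l ih =>
    simp only [List.foldl_cons, List.filter_cons]
    by_cases h0 : PySem.Str.pyGet? s p = some '0' <;>
      by_cases h1 : PySem.Str.pyGet? s p = some '1' <;>
      simp_all [List.append_assoc]

-- A's inner indexed scan computes B's two filters
theorem pvAInner_eq (lst : List String) (p : Int) :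
    pvAInner lst p
    = (lst.filter (fun s => PySem.Str.pyGet? s p == some '0'),
       lst.filter (fun s => PySem.Str.pyGet? s p == some '1')) := by
  unfold pvAInner
  rw [show PySem.List.len lst = ((lst.length : Int)) from by simp [PySem.List.len]]
  rw [PySem.List.foldl_pyRange_zero_pyGetD' lst ""
      (fun (acc : List String × List String) line =>
        if PySem.Str.pyGet? line p == some '0' then (acc.1 ++ [line], acc.2)
        else if PySem.Str.pyGet? line p == some '1' then (acc.1, acc.2 ++ [line])
        else acc)
      (([], []) : List String × List String)]
  simpa using pvFoldPair p lst [] []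

-- the loops agree from any position on
theorem pvLoop_eq (w : Nat) : ∀ (n pos : Nat) (lst : List String), w ≤ pos + n →
    pvBHelper w lst pos = pvBPop2 (pvAOuter (PySem.List.pyRange pos w 1) lst) := by
  intro n
  induction n with
  | zero =>
    intro pos lst h
    rw [pvBHelper, if_pos (Or.inr (by omega)),
        PySem.List.pyRange_one_eq_nil (by exact_mod_cast h), pvAOuter]
  | succ n ih =>
    intro pos lst h
    by_cases hw : w ≤ pos
    · rw [pvBHelper, if_pos (Or.inr hw),
          PySem.List.pyRange_one_eq_nil (by exact_mod_cast hw), pvAOuter]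
    · rw [PySem.List.pyRange_one_cons (by exact_mod_cast (by omega : pos < w))]
      by_cases hl : lst.length ≤ 1
      · rw [pvBHelper, if_pos (Or.inl hl)]
        simp only [pvAOuter, if_pos hl]
      · rw [pvBHelper, if_neg (by omega)]
        simp only [pvAOuter, if_neg hl, pvAInner_eq]
        rw [show ((pos : Int) + 1) = (((pos + 1 : Nat) : Int)) from by push_cast; ring]
        rw [← ih (pos + 1) _ (by omega)]

-- ===== VERDICT (by name: the statement is the Claim_ definition above) =====
theorem get_scrubber_rating_spec : Claim_equal_get_scrubber_rating := by
  intro question_input _ _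
  have h := pvLoop_eq ((question_input.headD "").toList.length)
      ((question_input.headD "").toList.length) 0 question_input (by omega)
  simp only [Nat.cast_zero] at h
  show pvBPop2 (pvAOuter
      (PySem.List.pyRange 0 (PySem.Str.len (question_input.headD "")) 1) question_input)
    = pvBHelper ((question_input.headD "").toList.length) question_input 0
  rw [show PySem.Str.len (question_input.headD "")
      = (((question_input.headD "").toList.length : Int)) from by simp [PySem.Str.len_eq]]
  exact h.symm
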